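-- pv_equiv track=rewrite | github.com/bio-hpc/STELLAR | STELLAR/save_pose_CN_coordinates.py | extract_first_residue
-- ===== SOURCE A (Python) =====
-- def extract_first_residue(atoms):
--     """Atoms of the first residue (minimum residue number).
--     Same logic as check_overlap_VS_GN.py and check_overlap_VS_LF_Def.py."""
--     if not atoms:
--         return []
--     # Convert the 6th element (index 5) to integer and find the minimum value
--     try:
--         min_value = min(int(t[5]) for t in atoms)
--         # Extract and return the tuples with the minimum 6th element value
--         return [t for t in atoms if int(t[5]) == min_value]
--     except (ValueError, IndexError):
--         return atoms
-- ===== SOURCE B (Python) =====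
-- def extract_first_residue(atoms):
--     """One pass builds a dict grouping atoms by int(t[5]); return the bucket
--     with the smallest key (insertion order preserves the original order)."""
--     if not atoms:
--         return []
--     groups = {}
--     try:
--         for t in atoms:
--             groups.setdefault(int(t[5]), []).append(t)
--     except (ValueError, IndexError):
--         return atoms
--     return groups[min(groups)]
-- ===== Notes on version B (the rewrite author's own statement) =====
-- stated objective: alternative
-- what changed: Replaces the min-scan plus filter-scan (which parses every residue number twice) by a single pass that groups atoms into a dict keyed by int(t[5]) and then returns the bucket of the smallest key.
import Mathlib
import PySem

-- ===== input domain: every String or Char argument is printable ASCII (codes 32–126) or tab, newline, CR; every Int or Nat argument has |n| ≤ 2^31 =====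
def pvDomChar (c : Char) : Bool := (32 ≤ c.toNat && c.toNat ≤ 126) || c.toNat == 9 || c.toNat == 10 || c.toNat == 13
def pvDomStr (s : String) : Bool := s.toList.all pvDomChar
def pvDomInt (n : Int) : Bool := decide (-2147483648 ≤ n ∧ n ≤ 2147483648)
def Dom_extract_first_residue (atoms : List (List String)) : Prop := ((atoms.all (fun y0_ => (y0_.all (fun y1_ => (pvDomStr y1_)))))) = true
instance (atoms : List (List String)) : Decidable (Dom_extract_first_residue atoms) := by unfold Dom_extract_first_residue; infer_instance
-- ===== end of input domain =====

-- One honest line: B groups the atoms by int(t[5]) into a dict in one pass and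
-- returns the bucket of the smallest key, instead of A's min-scan followed by a
-- filter-scan; same behaviour, alternative data structure.

-- int(t[5]) : none = IndexError (short row) or ValueError (bad int literal)
def pvParse (t : List String) : Option Int :=
  (PySem.List.pyGet? t 5).bind PySem.Int.ofStr?

-- ===== PORT A =====
-- 'min(int(t[5]) for t in atoms)': collect the parsed keys left to right (none
-- as soon as one raises), then take the running min; on none return atoms.
def pvKeysA : List (List String) → Option (List Int)
  | [] => some []
  | t :: ts =>
    match pvParse t, pvKeysA ts with
    | some k, some ks => some (k :: ks)
    | _, _ => none

def extract_first_residue (atoms : List (List String)) : List (List String) :=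
  if atoms = [] then []
  else
    match pvKeysA atoms with
    | none => atoms
    | some ks =>
      match PySem.List.min? ks (fun x => x) with
      | none => atoms   -- unreachable: atoms ≠ [] gives ks ≠ []
      | some m => atoms.filter (fun t => pvParse t == some m)

-- ===== PORT B =====
-- the for-loop: groups.setdefault(int(t[5]), []).append(t), aborting (none)
-- at the first ValueError/IndexError
def pvGroupsB (atoms : List (List String)) : Option (PySem.Dict Int (List (List String))) :=
  atoms.foldl
    (fun acc t => acc.bind (fun d => (pvParse t).map (fun k => d.modify k [] (· ++ [t]))))
    (some PySem.Dict.empty)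

def extract_first_residue_alt (atoms : List (List String)) : List (List String) :=
  if atoms = [] then []
  else
    match pvGroupsB atoms with
    | none => atoms
    | some d =>
      match PySem.List.min? d.keys (fun x => x) with
      | none => atoms   -- unreachable: atoms ≠ [] gives keys ≠ []
      | some m => d.getD m []

-- ===== PRECONDITION & SPEC =====
def Spec_extract_first_residue (atoms : List (List String)) (out : List (List String)) : Prop := out = extract_first_residue_alt atoms
instance (atoms : List (List String)) (out : List (List String)) : Decidable (Spec_extract_first_residue atoms out) := by unfold Spec_extract_first_residue; infer_instance

-- ===== CLAIM (what is proved, stated in full; the proofs are below) =====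
def Claim_equal_extract_first_residue : Prop := ∀ (atoms : List (List String)), Dom_extract_first_residue atoms → Spec_extract_first_residue atoms (extract_first_residue atoms)

-- ===== LEMMAS AND PROOFS =====

-- totalised key (only used under the hypothesis that every parse succeeds)
def pvKey0 (t : List String) : Int := (pvParse t).getD 0

theorem pvKeysA_some {atoms : List (List String)} {ks : List Int}
    (h : pvKeysA atoms = some ks) :
    ks = atoms.map pvKey0 ∧ ∀ t ∈ atoms, pvParse t = some (pvKey0 t) := by
  induction atoms generalizing ks with
  | nil => simp [pvKeysA] at h; simp [h]
  | cons t ts ih =>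
    simp only [pvKeysA] at h
    cases hp : pvParse t with
    | none => rw [hp] at h; exact absurd h (by simp)
    | some k =>
      rw [hp] at h
      cases hks : pvKeysA ts with
      | none => rw [hks] at h; exact absurd h (by simp)
      | some ks' =>
        rw [hks] at h
        simp only [Option.some.injEq] at h
        obtain ⟨h1, h2⟩ := ih hks
        subst h
        refine ⟨by simp [pvKey0, hp, ← h1], ?_⟩
        intro u hu
        rw [List.mem_cons] at hu
        rcases hu with hu | hu
        · subst hu; simp [pvKey0, hp]
        · exact h2 u hu

theorem pvFoldl_none (atoms : List (List String)) :
    atoms.foldl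
      (fun acc t => acc.bind (fun d => (pvParse t).map (fun k => d.modify k [] (· ++ [t]))))
      none = (none : Option (PySem.Dict Int (List (List String)))) := by
  induction atoms with
  | nil => rfl
  | cons t ts ih => simpa using ih

theorem pvGroupsB_none {atoms : List (List String)}
    (h : pvKeysA atoms = none) :
    ∀ d : PySem.Dict Int (List (List String)),
      atoms.foldl
        (fun acc t => acc.bind (fun d => (pvParse t).map (fun k => d.modify k [] (· ++ [t]))))
        (some d) = none := by
  induction atoms with
  | nil => simp [pvKeysA] at h
  | cons t ts ih =>
    intro d
    simp only [pvKeysA] at h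
    cases hp : pvParse t with
    | none => simp [List.foldl_cons, hp, pvFoldl_none]
    | some k =>
      rw [hp] at h
      cases hks : pvKeysA ts with
      | none => simp only [List.foldl_cons, hp, Option.bind_some, Option.map_some]
                exact ih hks _
      | some ks => rw [hks] at h; simp at h

theorem pvGroupsB_some {atoms : List (List String)}
    (hall : ∀ t ∈ atoms, pvParse t = some (pvKey0 t)) :
    ∀ d : PySem.Dict Int (List (List String)),
      atoms.foldl
        (fun acc t => acc.bind (fun d => (pvParse t).map (fun k => d.modify k [] (· ++ [t]))))
        (some d)
      = some (atoms.foldl (fun d t => d.modify (pvKey0 t) [] (· ++ [t])) d) := by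
  induction atoms with
  | nil => intro d; rfl
  | cons t ts ih =>
    intro d
    have hp : pvParse t = some (pvKey0 t) := hall t (by simp)
    simp only [List.foldl_cons, hp, Option.bind_some, Option.map_some]
    exact ih (fun u hu => hall u (by simp [hu])) _

-- the grouping fold as a fold over key/value pairs, to use the PySem lemmas
theorem pvGroup_as_pairs (atoms : List (List String)) (d : PySem.Dict Int (List (List String))) :
    atoms.foldl (fun d t => d.modify (pvKey0 t) [] (· ++ [t])) d
    = (atoms.map (fun t => (pvKey0 t, t))).foldl (fun d p => d.modify p.1 [] (· ++ [p.2])) d := by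
  rw [List.foldl_map]

theorem pvMin_ofList (ks : List Int) {m m' : Int}
    (h1 : PySem.List.min? ks (fun x => x) = some m)
    (h2 : PySem.List.min? (PySem.Set.ofList ks) (fun x => x) = some m') : m = m' := by
  have hm : m ∈ ks := PySem.List.min?_mem h1
  have hm' : m' ∈ PySem.Set.ofList ks := PySem.List.min?_mem h2
  have hm'' : m' ∈ ks := (PySem.Set.mem_ofList _ _).mp hm'
  have hle1 : m ≤ m' := PySem.List.min?_isMin h1 m' hm''
  have hle2 : m' ≤ m := PySem.List.min?_isMin h2 m ((PySem.Set.mem_ofList _ _).mpr hm)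
  omega

-- ===== VERDICT (by name: the statement is the Claim_ definition above) =====
theorem extract_first_residue_spec : Claim_equal_extract_first_residue := by
  intro atoms _
  unfold Spec_extract_first_residue extract_first_residue extract_first_residue_alt
  by_cases hne : atoms = []
  · simp [hne]
  · simp only [if_neg hne]
    cases hks : pvKeysA atoms with
    | none =>
      have : pvGroupsB atoms = none := by
        unfold pvGroupsB; exact pvGroupsB_none hks _
      rw [this]
    | some ks =>
      obtain ⟨hkseq, hall⟩ := pvKeysA_some hks
      have hG : pvGroupsB atoms
          = some (atoms.foldl (fun d t => d.modify (pvKey0 t) [] (· ++ [t])) PySem.Dict.empty) := by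
        unfold pvGroupsB; exact pvGroupsB_some hall _
      rw [hG]
      dsimp only
      set D := atoms.foldl (fun d t => d.modify (pvKey0 t) [] (· ++ [t])) PySem.Dict.empty with hD
      -- keys of the grouping dict are the distinct parsed keys, in order
      have hkeys : D.keys = PySem.Set.ofList (atoms.map pvKey0) := by
        rw [hD, pvGroup_as_pairs]
        rw [PySem.Dict.keys_foldl_modify_key]
        simp [PySem.Dict.keys_empty, PySem.Set.update_nil_left, List.map_map, Function.comp_def]
      -- ks is nonempty
      have hksne : ks ≠ [] := by
        intro h; apply hne; rw [h] at hkseq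
        exact List.eq_nil_of_map_eq_nil hkseq.symm
      cases hmA : PySem.List.min? ks (fun x => x) with
      | none => exact absurd ((PySem.List.min?_eq_none_iff _ _).mp hmA) hksne
      | some m =>
        have hkeysne : D.keys ≠ [] := by
          rw [hkeys]
          intro h
          have : m ∈ PySem.Set.ofList (atoms.map pvKey0) :=
            (PySem.Set.mem_ofList _ _).mpr (by rw [← hkseq]; exact PySem.List.min?_mem hmA)
          rw [h] at this; exact absurd this (by simp)
        cases hmB : PySem.List.min? D.keys (fun x => x) with
        | none => exact absurd ((PySem.List.min?_eq_none_iff _ _).mp hmB) hkeysne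
        | some m' =>
          have hmm : m = m' := by
            apply pvMin_ofList (atoms.map pvKey0)
            · rw [← hkseq]; exact hmA
            · rw [← hkeys]; exact hmB
          subst hmm
          dsimp only
          -- the min bucket is exactly A's filter
          have hbucket : D.getD m [] = atoms.filter (fun t => pvKey0 t == m) := by
            rw [hD, pvGroup_as_pairs, PySem.Dict.getD_foldl_modify_append]
            simp [PySem.Dict.getD_empty, List.filter_map, Function.comp_def]
          rw [hbucket]
          apply List.filter_congr
          intro t ht
          simp [hall t ht]
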